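-- pv_equiv track=rewrite | github.com/anthonyqsun/blog-snapshot | MarkdownParser.py | findAllIndicesWithin
-- ===== SOURCE A (Python) =====
-- def findAllIndicesWithin(l: list, symbol):
--     index = []
--     i=0
--     append = False
--     while i < len(l):
--         if l[i]== symbol:
--             append = not append
--         if append:
--             index.append(i)
--         i+=1
--     return index
-- ===== SOURCE B (Python) =====
-- def findAllIndicesWithin(l: list, symbol):
--     positions = [i for i, x in enumerate(l) if x == symbol]
--     index = []
--     k = 0
--     while k + 1 < len(positions):
--         index.extend(range(positions[k], positions[k + 1]))
--         k += 2
--     if k < len(positions):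
--         index.extend(range(positions[k], len(l)))
--     return index
-- ===== Notes on version B (the rewrite author's own statement) =====
-- stated objective: alternative
-- what changed: Replaces the single-pass boolean-toggle loop with a two-phase algorithm: first build the table of symbol positions, then emit whole index ranges for each consecutive pair of positions (with an odd trailing position extending to len(l)).
import Mathlib
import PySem

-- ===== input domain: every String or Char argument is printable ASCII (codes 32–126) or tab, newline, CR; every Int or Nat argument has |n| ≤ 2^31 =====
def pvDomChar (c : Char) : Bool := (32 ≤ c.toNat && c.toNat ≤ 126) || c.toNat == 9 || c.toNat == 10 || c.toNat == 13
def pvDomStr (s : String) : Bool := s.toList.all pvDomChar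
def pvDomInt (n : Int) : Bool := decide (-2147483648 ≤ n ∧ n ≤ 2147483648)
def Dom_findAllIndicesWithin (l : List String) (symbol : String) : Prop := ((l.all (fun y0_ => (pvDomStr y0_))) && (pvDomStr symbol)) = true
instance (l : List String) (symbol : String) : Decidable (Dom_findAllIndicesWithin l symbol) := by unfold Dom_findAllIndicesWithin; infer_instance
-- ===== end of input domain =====

-- B replaces A's boolean-toggle single pass by a two-phase algorithm (collect symbol positions, then emit index ranges per pair); same cost, alternative structure.


-- ===== PORT A =====
-- A's while loop over i with the toggled `append` flag, as structural recursion
-- over the list carrying the index counter and the flag; indices emitted in order.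
def goA (symbol : String) : List String → Nat → Bool → List Int
  | [], _, _ => []
  | x :: xs, i, app =>
    let app' := if x == symbol then !app else app
    (if app' then [(i : Int)] else []) ++ goA symbol xs (i + 1) app'

def findAllIndicesWithin (l : List String) (symbol : String) : List Int :=
  goA symbol l 0 false

-- ===== PORT B =====
-- phase 1: positions of the symbol (enumerate + filter)
def altPositions (symbol : String) : List String → Nat → List Nat
  | [], _ => []
  | x :: xs, i =>
    if x == symbol then i :: altPositions symbol xs (i + 1)
    else altPositions symbol xs (i + 1)

-- phase 2: consume the position table two at a time, emitting range(p, q);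
-- a trailing odd position emits range(p, n).
def altEmit (n : Nat) : List Nat → List Int
  | [] => []
  | [p] => (List.range' p (n - p)).map Int.ofNat
  | p :: q :: rest => (List.range' p (q - p)).map Int.ofNat ++ altEmit n rest

def findAllIndicesWithin_alt (l : List String) (symbol : String) : List Int :=
  altEmit l.length (altPositions symbol l 0)

-- ===== PRECONDITION & SPEC =====
def Spec_findAllIndicesWithin (l : List String) (symbol : String) (out : List Int) : Prop := out = findAllIndicesWithin_alt l symbol
instance (l : List String) (symbol : String) (out : List Int) : Decidable (Spec_findAllIndicesWithin l symbol out) := by unfold Spec_findAllIndicesWithin; infer_instance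

-- ===== CLAIM (what is proved, stated in full; the proofs are below) =====
def Claim_equal_findAllIndicesWithin : Prop := ∀ (l : List String) (symbol : String), Dom_findAllIndicesWithin l symbol → Spec_findAllIndicesWithin l symbol (findAllIndicesWithin l symbol)

-- ===== LEMMAS AND PROOFS =====

-- the "flag currently on" variant of altEmit: indices flow from i until the next
-- position (which closes the segment) or until the end of the list
def emitT (n i : Nat) : List Nat → List Int
  | [] => (List.range' i (n - i)).map Int.ofNat
  | q :: rest => (List.range' i (q - i)).map Int.ofNat ++ altEmit n rest

theorem altEmit_cons (n p : Nat) (ps : List Nat) :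
    altEmit n (p :: ps) = emitT n p ps := by
  cases ps <;> simp [altEmit, emitT]

theorem altPositions_lb (symbol : String) :
    ∀ (xs : List String) (i q : Nat), q ∈ altPositions symbol xs i → i ≤ q := by
  intro xs
  induction xs with
  | nil => intro i q h; simp [altPositions] at h
  | cons x xs ih =>
    intro i q h
    simp only [altPositions] at h
    split at h
    · rcases List.mem_cons.1 h with h | h
      · omega
      · have := ih (i + 1) q h; omega
    · have := ih (i + 1) q h; omega

theorem emitT_cons (n i : Nat) (ps : List Nat)
    (hn : i < n) (hps : ∀ q ∈ ps, i < q) :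
    emitT n i ps = (Int.ofNat i) :: emitT n (i + 1) ps := by
  cases ps with
  | nil =>
    have h : n - i = (n - (i + 1)) + 1 := by omega
    simp [emitT, h, List.range'_succ]
  | cons q rest =>
    have hq : i < q := hps q (List.mem_cons_self ..)
    have h : q - i = (q - (i + 1)) + 1 := by omega
    simp [emitT, h, List.range'_succ]

theorem goA_eq (symbol : String) :
    ∀ (xs : List String) (i : Nat),
      goA symbol xs i false = altEmit (i + xs.length) (altPositions symbol xs i) ∧
      goA symbol xs i true = emitT (i + xs.length) i (altPositions symbol xs i) := by
  intro xs
  induction xs with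
  | nil => intro i; constructor <;> simp [goA, altPositions, altEmit, emitT]
  | cons x xs ih =>
    intro i
    have hlb : ∀ q ∈ altPositions symbol xs (i + 1), i < q := by
      intro q hq; have := altPositions_lb symbol xs (i + 1) q hq; omega
    by_cases hx : (x == symbol) = true
    · constructor
      · -- flag off, symbol: toggles on, i emitted
        simp only [goA, hx, altPositions, Bool.not_false, if_true, List.singleton_append,
          List.length_cons]
        rw [(ih (i + 1)).2, altEmit_cons]
        rw [show i + (xs.length + 1) = i + 1 + xs.length from by omega]
        rw [emitT_cons (i + 1 + xs.length) i _ (by omega) hlb]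
        norm_cast
      · -- flag on, symbol: toggles off, i not emitted
        simp only [goA, hx, altPositions, Bool.not_true, if_true, List.length_cons]
        rw [(ih (i + 1)).1]
        rw [show i + (xs.length + 1) = i + 1 + xs.length from by omega]
        simp [emitT]
    · constructor
      · -- flag off, no symbol: state unchanged
        simp only [goA, altPositions, hx, Bool.false_eq_true, if_false, List.nil_append,
          List.length_cons]
        rw [(ih (i + 1)).1]
        rw [show i + (xs.length + 1) = i + 1 + xs.length from by omega]
      · -- flag on, no symbol: i emitted
        simp only [goA, altPositions, hx, Bool.false_eq_true, if_false, if_true,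
          List.singleton_append, List.length_cons]
        rw [(ih (i + 1)).2]
        rw [show i + (xs.length + 1) = i + 1 + xs.length from by omega]
        rw [emitT_cons (i + 1 + xs.length) i _ (by omega) hlb]
        norm_cast

-- ===== VERDICT (by name: the statement is the Claim_ definition above) =====
theorem findAllIndicesWithin_spec : Claim_equal_findAllIndicesWithin := by
  intro l symbol _
  unfold Spec_findAllIndicesWithin findAllIndicesWithin findAllIndicesWithin_alt
  rw [(goA_eq symbol l 0).1]
  simp
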